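-- pv_equiv track=rewrite | github.com/pypi-data/pypi-mirror-361 | packages/swm-android/swm_android-0.3.3.1-py2.py3-none-any.whl/swm/cli.py | extract_app_id_from_activity_record
-- ===== SOURCE A (Python) =====
-- def extract_app_id_from_activity_record(text: str, return_original_on_failure=True):
--     items = text.replace("/", "/ /").split()
--     for it in items:
--         it = it.strip()
--         if it.endswith("/"):
--             return it[:-1]
--     if return_original_on_failure:
--         return text
-- ===== SOURCE B (Python) =====
-- def extract_app_id_from_activity_record(text: str, return_original_on_failure=True):
--     idx = text.find("/")
--     if idx == -1:
--         return text if return_original_on_failure else None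
--     start = idx
--     while start > 0 and not text[start - 1].isspace():
--         start -= 1
--     return text[start:idx]
-- ===== Notes on version B (the rewrite author's own statement) =====
-- stated objective: simpler
-- what changed: B replaces A's slash-padding, whitespace-split and scan-over-tokens strategy by a single find of the first slash followed by a short backward scan to the preceding whitespace, slicing the word out directly with no intermediate token list.
import Mathlib
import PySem

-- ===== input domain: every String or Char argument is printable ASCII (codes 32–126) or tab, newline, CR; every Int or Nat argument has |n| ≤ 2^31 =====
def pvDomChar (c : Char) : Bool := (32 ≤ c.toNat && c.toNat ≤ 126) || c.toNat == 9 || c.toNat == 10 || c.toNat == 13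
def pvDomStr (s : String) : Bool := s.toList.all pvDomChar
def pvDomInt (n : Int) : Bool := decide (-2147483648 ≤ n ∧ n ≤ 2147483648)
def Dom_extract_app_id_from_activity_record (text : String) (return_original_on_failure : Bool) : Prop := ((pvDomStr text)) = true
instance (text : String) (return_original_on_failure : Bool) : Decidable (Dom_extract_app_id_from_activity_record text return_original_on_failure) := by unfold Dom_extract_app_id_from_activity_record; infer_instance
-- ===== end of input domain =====

-- B replaces A's slash-padding, whitespace-split and scan-over-tokens strategy by one find of the
-- first slash plus a short backward scan to the preceding whitespace, building no intermediate
-- token list (objective: simpler).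

-- ===== PORT A =====
-- 'for it in items: it = it.strip(); if it.endswith("/"): return it[:-1]'
def pvALoop : List (List Char) → Option (List Char)
  | [] => none
  | it :: rest =>
      let it2 := PySem.Chars.strip it
      if PySem.Chars.endswith it2 ['/'] then some (PySem.List.slice it2 none (some (-1)))
      else pvALoop rest

def extract_app_id_from_activity_record (text : String) (return_original_on_failure : Bool) : Option String :=
  let items := PySem.Chars.split₀ (PySem.Chars.replace text.toList ['/'] ['/', ' ', '/'])
  match pvALoop items with
  | some r => some (String.ofList r)
  | none => if return_original_on_failure then some text else none

-- ===== PORT B =====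
-- 'while start > 0 and not text[start - 1].isspace(): start -= 1' ; the index start-1 is always
-- in range, so the in-range access text[start-1] is ported with List.getD (exact here).
def pvBackScan (cs : List Char) : Nat → Nat
  | 0 => 0
  | n + 1 => if PySem.Chars.isspace (cs.getD n ' ') then n + 1 else pvBackScan cs n

def extract_app_id_from_activity_record_alt (text : String) (return_original_on_failure : Bool) : Option String :=
  let cs := text.toList
  let idx := PySem.Chars.find cs ['/']
  if idx = -1 then (if return_original_on_failure then some text else none)
  else
    let start := pvBackScan cs idx.toNat
    some (String.ofList (PySem.List.slice cs (some (start : Int)) (some idx)))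

-- ===== PRECONDITION & SPEC =====
def Spec_extract_app_id_from_activity_record (text : String) (return_original_on_failure : Bool) (out : Option String) : Prop := out = extract_app_id_from_activity_record_alt text return_original_on_failure
instance (text : String) (return_original_on_failure : Bool) (out : Option String) : Decidable (Spec_extract_app_id_from_activity_record text return_original_on_failure out) := by unfold Spec_extract_app_id_from_activity_record; infer_instance

-- ===== CLAIM (what is proved, stated in full; the proofs are below) =====
def Claim_equal_extract_app_id_from_activity_record : Prop := ∀ (text : String) (return_original_on_failure : Bool), Dom_extract_app_id_from_activity_record text return_original_on_failure → Spec_extract_app_id_from_activity_record text return_original_on_failure (extract_app_id_from_activity_record text return_original_on_failure)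

-- ===== LEMMAS AND PROOFS =====

theorem pvReplace_go_eq (new : List Char) :
    ∀ (cs : List Char) (fuel : Nat) (acc : List Char), cs.length ≤ fuel →
      PySem.Chars.replace.go ['/'] new fuel cs acc =
        acc.reverse ++ cs.flatMap (fun c => if c = '/' then new else [c]) := by
  intro cs
  induction cs with
  | nil => intro fuel acc h; cases fuel <;> simp [PySem.Chars.replace.go]
  | cons c t ih =>
      intro fuel acc h
      cases fuel with
      | zero => simp at h
      | succ n =>
        simp only [PySem.Chars.replace.go]
        by_cases hc : c = '/'
        · subst hc
          have : List.isPrefixOf ['/'] ('/' :: t) = true := by simp [List.isPrefixOf]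
          simp only [this, if_true, List.length_cons, List.length_nil, List.drop_succ_cons,
            List.drop_zero]
          rw [ih n (new.reverse ++ acc) (by simp at h; omega)]
          simp [List.flatMap_cons]
        · have : List.isPrefixOf ['/'] (c :: t) = false := by
            simp [List.isPrefixOf]; exact fun h' => (hc h'.symm).elim
          simp only [this]
          rw [ih n _ (by simp at h; omega)]
          simp [List.flatMap_cons, hc]

def pvR (cs : List Char) : List Char :=
  cs.flatMap (fun c => if c = '/' then ['/', ' ', '/'] else [c])

theorem pvReplace_eq (cs : List Char) :
    PySem.Chars.replace cs ['/'] ['/', ' ', '/'] = pvR cs := by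
  simp [PySem.Chars.replace, pvR]
  exact pvReplace_go_eq _ cs cs.length [] le_rfl

theorem pvSplitGo_acc : ∀ (cs cur : List Char) (acc : List (List Char)),
    PySem.Chars.split₀.go cs cur acc = acc.reverse ++ PySem.Chars.split₀.go cs cur [] := by
  intro cs
  induction cs with
  | nil =>
      intro cur acc
      simp only [PySem.Chars.split₀.go]
      by_cases hc : cur.isEmpty <;> simp [hc]
  | cons c t ih =>
      intro cur acc
      simp only [PySem.Chars.split₀.go]
      by_cases hs : PySem.Chars.isspace c
      · by_cases hc : cur.isEmpty <;> simp [hs, hc]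
        · rw [ih [] acc]
        · rw [ih [] (cur.reverse :: acc), ih [] [cur.reverse]]
          simp
      · simp [hs]; rw [ih (c :: cur) acc]

theorem pvALoop_append (l₁ l₂ : List (List Char)) :
    pvALoop (l₁ ++ l₂) = (pvALoop l₁).orElse (fun _ => pvALoop l₂) := by
  induction l₁ with
  | nil => simp [pvALoop]
  | cons x t ih =>
      simp only [List.cons_append, pvALoop]
      by_cases h : PySem.Chars.endswith (PySem.Chars.strip x) ['/'] <;> simp [h, ih, Option.orElse]

theorem pvALoop_none : ∀ (l : List (List Char)), (∀ t ∈ l, '/' ∉ t) → pvALoop l = none := by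
  intro l h
  induction l with
  | nil => rfl
  | cons x t ih =>
      have hx : '/' ∉ x := h x (by simp)
      have hend : PySem.Chars.endswith (PySem.Chars.strip x) ['/'] = false := by
        rw [Bool.eq_false_iff]
        intro hc
        rw [PySem.Chars.endswith_iff] at hc
        have : '/' ∈ PySem.Chars.strip x := hc.mem (by simp)
        have hsub : PySem.Chars.strip x <:+: x := by
          have h1 : PySem.Chars.rstrip (PySem.Chars.lstrip x) <+: PySem.Chars.lstrip x := by
            unfold PySem.Chars.rstrip
            have h := List.dropWhile_suffix (l := (PySem.Chars.lstrip x).reverse)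
              (p := PySem.Chars.isspace)
            conv_rhs => rw [← List.reverse_reverse (PySem.Chars.lstrip x)]
            exact List.reverse_prefix.mpr h
          have h2 : PySem.Chars.lstrip x <:+ x := List.dropWhile_suffix _
          exact (h1.isInfix).trans h2.isInfix
        exact hx (hsub.mem this)
      simp [pvALoop, hend]
      exact ih (fun t ht => h t (by simp [ht]))

theorem pvDropWhile_eq_self_of (p : Char → Bool) (t : List Char)
    (h : ∀ c ∈ t, p c = false) : t.dropWhile p = t := by
  cases t with
  | nil => rfl
  | cons a s => simp [h a (by simp)]

theorem pvStrip_of_nonspace (t : List Char) (h : ∀ c ∈ t, PySem.Chars.isspace c = false) :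
    PySem.Chars.strip t = t := by
  unfold PySem.Chars.strip PySem.Chars.lstrip PySem.Chars.rstrip
  rw [pvDropWhile_eq_self_of _ t h,
    pvDropWhile_eq_self_of _ t.reverse (fun c hc => h c (List.mem_reverse.mp hc)),
    List.reverse_reverse]

theorem pvSlice_dropLast (t : List Char) (h : t ≠ []) :
    PySem.List.slice t none (some (-1)) = t.dropLast := by
  have hl : 0 < t.length := List.length_pos_iff.mpr h
  unfold PySem.List.slice PySem.List.clampIdx
  have h1 : ((t.length : Int) + (-1) < 0) = False := by simp; omega
  simp only [h1]
  rw [List.dropLast_eq_take]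
  simp
  omega

theorem pvToken_no_slash (x : List Char) (hx : '/' ∉ x) :
    PySem.Chars.endswith (PySem.Chars.strip x) ['/'] = false := by
  rw [Bool.eq_false_iff]
  intro hc
  rw [PySem.Chars.endswith_iff] at hc
  have hmem : '/' ∈ PySem.Chars.strip x := hc.mem (by simp)
  have h1 : PySem.Chars.rstrip (PySem.Chars.lstrip x) <+: PySem.Chars.lstrip x := by
    unfold PySem.Chars.rstrip
    have h := List.dropWhile_suffix (l := (PySem.Chars.lstrip x).reverse)
      (p := PySem.Chars.isspace)
    conv_rhs => rw [← List.reverse_reverse (PySem.Chars.lstrip x)]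
    exact List.reverse_prefix.mpr h
  have h2 : PySem.Chars.lstrip x <:+ x := List.dropWhile_suffix _
  exact hx (((h1.isInfix).trans h2.isInfix).mem hmem)

def pvSpecGo (acc : List Char) : List Char → Option (List Char)
  | [] => none
  | c :: t =>
      if c = '/' then some acc.reverse
      else if PySem.Chars.isspace c then pvSpecGo [] t
      else pvSpecGo (c :: acc) t

theorem pvA_main :
    ∀ (cs cur : List Char), '/' ∉ cur → (∀ c ∈ cur, PySem.Chars.isspace c = false) →
      pvALoop (PySem.Chars.split₀.go (pvR cs) cur []) = pvSpecGo cur cs := by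
  intro cs
  induction cs with
  | nil =>
      intro cur h1 h2
      simp only [pvR, List.flatMap_nil, PySem.Chars.split₀.go, pvSpecGo]
      by_cases hc : cur.isEmpty
      · simp [hc, pvALoop]
      · simp only [hc, if_neg, Bool.false_eq_true, not_false_iff, List.reverse_cons,
          List.reverse_nil, List.nil_append]
        simp [pvALoop, pvToken_no_slash cur.reverse (by simpa using h1)]
  | cons c t ih =>
      intro cur h1 h2
      simp only [pvR] at ih
      by_cases hcs : c = '/'
      · subst hcs
        have hsp : PySem.Chars.isspace '/' = false := by decide
        have hsp2 : PySem.Chars.isspace ' ' = true := by decide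
        rw [show pvR ('/' :: t) = '/' :: ' ' :: '/' :: pvR t from rfl]
        simp only [PySem.Chars.split₀.go, hsp, hsp2, Bool.false_eq_true, if_neg, if_pos,
          not_false_iff, List.isEmpty_cons, List.reverse_cons, List.reverse_nil, List.nil_append]
        rw [pvSplitGo_acc]
        rw [pvALoop_append]
        have hT : pvALoop [('/' :: cur).reverse] = some cur.reverse := by
          have hns : ∀ a ∈ ('/' :: cur).reverse, PySem.Chars.isspace a = false := by
            intro a ha
            simp at ha
            rcases ha with ha | ha
            · exact h2 a ha
            · subst ha; decide
          simp only [pvALoop, pvStrip_of_nonspace _ hns]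
          have hend : PySem.Chars.endswith (('/' :: cur).reverse) ['/'] = true := by
            rw [PySem.Chars.endswith_iff]
            simp only [List.reverse_cons]
            exact List.suffix_append _ _
          rw [hend]
          simp only [if_pos]
          rw [pvSlice_dropLast _ (by simp)]
          simp
        simp only [List.reverse_cons, List.reverse_nil, List.nil_append] at hT ⊢
        rw [hT]
        simp [pvSpecGo, Option.orElse]
      · by_cases hsp : PySem.Chars.isspace c
        · simp only [pvR, List.flatMap_cons, if_neg hcs, List.singleton_append]
          simp only [PySem.Chars.split₀.go, hsp, if_pos]
          by_cases hce : cur.isEmpty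
          · simp only [hce, if_pos]
            rw [ih [] (by simp) (by simp)]
            simp [pvSpecGo, hcs, hsp]
          · simp only [hce, Bool.false_eq_true, if_neg, not_false_iff]
            rw [pvSplitGo_acc, pvALoop_append]
            simp only [List.reverse_cons, List.reverse_nil, List.nil_append]
            rw [pvALoop_none [cur.reverse] (by simpa using h1)]
            rw [ih [] (by simp) (by simp)]
            simp [pvSpecGo, hcs, hsp, Option.orElse]
        · simp only [pvR, List.flatMap_cons, if_neg hcs, List.singleton_append]
          simp only [PySem.Chars.split₀.go, hsp, Bool.false_eq_true, if_neg, not_false_iff]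
          rw [ih (c :: cur)
            (by intro hmem; rcases List.mem_cons.mp hmem with hm | hm
                · exact hcs hm.symm
                · exact h1 hm)
            (by intro a ha; rcases List.mem_cons.mp ha with hm | hm
                · subst hm; simpa using hsp
                · exact h2 a hm)]
          simp [pvSpecGo, hcs, hsp]

theorem pvTW_append_stop (p : Char → Bool) (X : List Char) (c : Char) (acc : List Char)
    (hc : p c = false) : ((X ++ c :: acc).takeWhile p) = X.takeWhile p := by
  rw [List.takeWhile_append]
  split_ifs with h
  · rw [List.takeWhile_cons_of_neg (by simp [hc])]
    rw [(List.takeWhile_prefix p).eq_of_length h]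
    simp
  · rfl

theorem pvTW_all (p : Char → Bool) (acc : List Char) (h : ∀ c ∈ acc, p c = true) :
    acc.takeWhile p = acc := by
  induction acc with
  | nil => rfl
  | cons a s ih =>
      rw [List.takeWhile_cons_of_pos (h a (by simp))]
      rw [ih (fun c hc => h c (by simp [hc]))]

theorem pvSpecGo_eq :
    ∀ (cs acc : List Char), (∀ c ∈ acc, PySem.Chars.isspace c = false) →
      pvSpecGo acc cs =
        if '/' ∈ cs then
          some ((((cs.takeWhile (· ≠ '/')).reverse ++ acc).takeWhile (fun c => !PySem.Chars.isspace c)).reverse)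
        else none := by
  intro cs
  induction cs with
  | nil => intro acc h; simp [pvSpecGo]
  | cons c t ih =>
      intro acc h
      by_cases hc : c = '/'
      · subst hc
        rw [List.takeWhile_cons_of_neg (by simp)]
        simp only [List.mem_cons, true_or, if_pos, List.reverse_nil, List.nil_append, pvSpecGo]
        rw [pvTW_all _ acc (by intro a ha; simp [h a ha])]
      · by_cases hsp : PySem.Chars.isspace c
        · simp only [pvSpecGo, hc, if_neg, hsp, if_pos, not_false_iff]
          rw [ih [] (by simp)]
          rw [List.takeWhile_cons_of_pos (by simp [hc])]
          simp only [List.mem_cons, List.reverse_cons, List.append_assoc, List.singleton_append]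
          rw [pvTW_append_stop _ _ c acc (by simp [hsp])]
          simp [Ne.symm hc]
        · simp only [pvSpecGo, hc, if_neg, hsp, not_false_iff, Bool.false_eq_true]
          rw [ih (c :: acc) (by intro a ha; rcases List.mem_cons.mp ha with hm | hm
                                · subst hm; simpa using hsp
                                · exact h a hm)]
          rw [List.takeWhile_cons_of_pos (by simp; exact fun hx => hc hx)]
          simp only [List.mem_cons, List.reverse_cons, List.append_assoc, List.singleton_append]
          simp [Ne.symm hc]

theorem pvFind_go_eq :
    ∀ (cs : List Char) (k : Nat),
      PySem.Chars.find.go ['/'] cs k =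
        if '/' ∈ cs then ((k : Int) + (cs.takeWhile (· ≠ '/')).length) else -1 := by
  intro cs
  induction cs with
  | nil => intro k; simp [PySem.Chars.find.go]
  | cons c t ih =>
      intro k
      by_cases hc : c = '/'
      · subst hc
        have hp : List.isPrefixOf ['/'] ('/' :: t) = true := by simp [List.isPrefixOf]
        simp only [PySem.Chars.find.go, hp]
        rw [List.takeWhile_cons_of_neg (by simp)]
        simp
      · have hp : List.isPrefixOf ['/'] (c :: t) = false := by
          simp [List.isPrefixOf]; exact fun h' => (hc h'.symm).elim
        simp only [PySem.Chars.find.go, hp, Bool.false_eq_true, if_neg, not_false_iff]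
        rw [ih (k + 1)]
        rw [List.takeWhile_cons_of_pos (by simp; exact fun hx => hc hx)]
        have : ('/' ∈ c :: t) = ('/' ∈ t) := by simp [List.mem_cons, Ne.symm hc]
        simp only [this]
        split_ifs
        · simp; ring
        · rfl

theorem pvBackScan_eq :
    ∀ (pre rest : List Char),
      pvBackScan (pre ++ rest) pre.length =
        pre.length - (pre.reverse.takeWhile (fun c => !PySem.Chars.isspace c)).length := by
  intro pre
  induction pre using List.reverseRecOn with
  | nil => intro rest; simp [pvBackScan]
  | append_singleton p c ih =>
      intro rest
      have hlen : (p ++ [c]).length = p.length + 1 := by simp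
      rw [hlen, List.append_assoc, List.singleton_append]
      have hget : (p ++ c :: rest).getD p.length ' ' = c := by
        simp [List.getD]
      simp only [pvBackScan, hget]
      by_cases hsp : PySem.Chars.isspace c
      · rw [if_pos hsp]
        rw [List.reverse_append, List.reverse_singleton, List.singleton_append]
        rw [List.takeWhile_cons_of_neg (by simp [hsp])]
        simp
      · rw [if_neg (by simp [hsp])]
        rw [ih (c :: rest)]
        rw [List.reverse_append, List.reverse_singleton, List.singleton_append]
        rw [List.takeWhile_cons_of_pos (by simp [hsp])]
        have hL : (p.reverse.takeWhile (fun c => !PySem.Chars.isspace c)).length ≤ p.length := by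
          have := (List.takeWhile_prefix (l := p.reverse)
            (p := fun c => !PySem.Chars.isspace c)).length_le
          simpa using this
        simp only [List.length_cons]
        omega

theorem pvSlice_word (pre rest : List Char) :
    PySem.List.slice (pre ++ rest)
      (some ((pre.length - (pre.reverse.takeWhile (fun c => !PySem.Chars.isspace c)).length : Nat) : Int))
      (some (pre.length : Int))
      = (pre.reverse.takeWhile (fun c => !PySem.Chars.isspace c)).reverse := by
  have hL : (pre.reverse.takeWhile (fun c => !PySem.Chars.isspace c)).length ≤ pre.length := by
    have := (List.takeWhile_prefix (l := pre.reverse)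
      (p := fun c => !PySem.Chars.isspace c)).length_le
    simpa using this
  have hpre : pre = (pre.reverse.dropWhile (fun c => !PySem.Chars.isspace c)).reverse ++
      (pre.reverse.takeWhile (fun c => !PySem.Chars.isspace c)).reverse := by
    conv_lhs => rw [← List.reverse_reverse pre,
      ← List.takeWhile_append_dropWhile (p := fun c => !PySem.Chars.isspace c) (l := pre.reverse)]
    rw [List.reverse_append]
  unfold PySem.List.slice PySem.List.clampIdx
  have h1 : ¬ ((((pre.length - (pre.reverse.takeWhile (fun c => !PySem.Chars.isspace c)).length : Nat) : Int)) < 0) := by omega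
  have h2 : ¬ (((pre.length : Nat) : Int) < 0) := by omega
  simp only [h1, h2, Int.toNat_natCast, List.length_append]
  rw [min_eq_left (by omega), min_eq_left (by omega)]
  conv_lhs => rw [hpre, List.append_assoc]
  rw [List.drop_append_of_le_length (by simp)]
  rw [List.drop_of_length_le (by simp)]
  simp only [List.nil_append]
  rw [List.take_append_of_le_length (by simp)]
  rw [List.take_of_length_le (by simp)]
  
theorem pvBackScan_eq' {cs pre rest : List Char} (h : cs = pre ++ rest) :
    pvBackScan cs pre.length =
      pre.length - (pre.reverse.takeWhile (fun c => !PySem.Chars.isspace c)).length := by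
  rw [h]; exact pvBackScan_eq pre rest
theorem pv_final (text : String) (rof : Bool) :
    extract_app_id_from_activity_record text rof = extract_app_id_from_activity_record_alt text rof := by
  unfold extract_app_id_from_activity_record extract_app_id_from_activity_record_alt
  dsimp only
  rw [pvReplace_eq]
  rw [show PySem.Chars.split₀ (pvR text.toList) = PySem.Chars.split₀.go (pvR text.toList) [] [] from rfl]
  rw [show pvR text.toList = pvR text.toList from rfl]
  rw [pvA_main text.toList [] (by simp) (by simp)]
  rw [pvSpecGo_eq text.toList [] (by simp)]
  rw [show PySem.Chars.find text.toList ['/'] = PySem.Chars.find.go ['/'] text.toList 0 from rfl]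
  rw [pvFind_go_eq text.toList 0]
  by_cases h : '/' ∈ text.toList
  · simp only [h, if_pos, List.append_nil, Nat.cast_zero, zero_add]
    rw [if_neg (by omega)]
    rw [Int.toNat_natCast]
    set pre := text.toList.takeWhile (fun x => x ≠ '/') with hpre
    set rest := text.toList.dropWhile (fun x => x ≠ '/') with hrest
    have hsplit : text.toList = pre ++ rest := (List.takeWhile_append_dropWhile).symm
    rw [pvBackScan_eq' hsplit]
    rw [hsplit]
    rw [pvSlice_word]
  · simp [h]

-- ===== VERDICT (by name: the statement is the Claim_ definition above) =====
theorem extract_app_id_from_activity_record_spec : Claim_equal_extract_app_id_from_activity_record := by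
  intro text rof _
  exact pv_final text rof
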